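/-
  jsmn_parse TERMINATES AND RE-ESTABLISHES ITS STATE INVARIANT — the two facts about the pure model (Json/Jsmn/Model.lean) that make jsmn's
  re-entrant use sound, in one statement, with the reason for every conjunct of the precondition in plain words.

  THE PRECONDITION `Inv cfg p toks n` (Json/Jsmn/Inv.lean) — what jsmn_parse needs of the parser struct and the token array it is handed.
  jsmn.h checks none of it on entry; a parser fresh from jsmn_init satisfies it (`SafeFacts.init`), and jsmn_parse re-establishes it on
  every return (below), so calling jsmn_parse again with the same parser, the same array and the same `num_tokens` (after JSMN_ERROR_PART,
  with more text) is always allowed.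
  Conjunct by conjunct, and the C expression that needs it:

    pos < 2^32, toknext < 2^32, -2^31 ≤ toksuper < 2^31, num_tokens < 2^32
        no restriction at all: the model keeps C's `unsigned int` / `int` objects as `Nat` / `Int`, and these say that the numbers fit their C types.
    ts.length = num_tokens                      (only with a token array, i.e. not in counting mode; so are all the following)
        `tokens` really has `num_tokens` entries. jsmn_alloc_token's only check is `parser->toknext >= num_tokens`; everything it hands out
        below that bound is then written (`tok->start = tok->end = -1; tok->size = 0;`).
    num_tokens ≤ 2^31
        jsmn indexes tokens with `int`s: `for (i = parser->toknext - 1; i >= 0; i--)`, `parser->toksuper = parser->toknext - 1;`,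
        `int count = parser->toknext;`. The conversions from `unsigned int` mean what they say only up to 2^31 - 1.
    toknext ≤ num_tokens
        the backward scans start at `tokens[parser->toknext - 1]` (`case '}': case ']':`, `case ',':`, and the final check for an unclosed
        object). jsmn_alloc_token's bound check protects the NEXT allocation, not these reads: the caller must not come back with a smaller array.
    -1 ≤ toksuper < num_tokens      (with JSMN_PARENT_LINKS: < toknext, an allocated token)
        `tokens[parser->toksuper].size++` after a string or a primitive, `t = &tokens[parser->toksuper]` in `case '{': case '[':`, the type
        test of `case ',':` — all guarded by `parser->toksuper != -1` only. With parent links a new token's `parent` is set to `toksuper`;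
        the link must point to an earlier, allocated token for the next conjunct to be kept.
    with JSMN_PARENT_LINKS: every allocated token's `parent` is -1 or the index of an EARLIER token
        `case '}': case ']':` walks `token = &tokens[token->parent]` in a `for (;;)` until it meets an open token or `parent == -1`: each step
        must stay inside the array and go strictly down, which is what makes that loop end.

  THE HYPOTHESIS ON THE LENGTH, `js.length < 2^32`: the three scanning loops are `for (; parser->pos < len && js[parser->pos] != '\0'; parser->pos++)`
  with `parser->pos` an `unsigned int` and `len` a `size_t`: the test can only be counted on to become false when `len` fits in 32 bits.
  (For the RESULT to be the documented token count — `Total.parse_result` — one needs in addition `toknext + js.length < 2^31`: `count` is an `int`.)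
-/
import Json.Jsmn.Total

namespace Jsmn

/-- **jsmn_parse always terminates and keeps its invariant.** For a text shorter than 2^32 bytes and a parser state / token array satisfying
`Inv`, the model answers (the fuel `js.length + 1` built into `parse` is enough: every loop of the C code ends), and the state it leaves
satisfies `Inv` again — for the same `num_tokens` — in both switches' every configuration, in token mode and in counting mode. -/
theorem parse_terminates_keeps_inv (cfg : Config) (js : List UInt8) (p : Parser) (toks : Option Tokens) (n : Nat)
    (hlen : js.length < 4294967296) (hinv : Inv cfg p toks n) :
    ∃ r p' toks', parse cfg js p toks n = some (r, p', toks') ∧ Inv cfg p' toks' n ∧ (toks' = none ↔ toks = none) := by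
  obtain ⟨⟨r, p', toks'⟩, h⟩ := parse_total cfg js p toks n hlen hinv
  exact ⟨r, p', toks', h, (safeFacts cfg).parse _ js p toks n r p' toks' hinv h⟩

/-- The same from a fresh parser (`jsmn_init`): any array of `num_tokens ≤ 2^31` entries with any content, or counting mode. -/
theorem run_terminates (cfg : Config) (js : List UInt8) (toks : Option Tokens) (n : Nat) (hlen : js.length < 4294967296)
    (hinit : Inv.Init toks n) : ∃ r toks', run cfg js toks n = some (r, toks') := by
  obtain ⟨r, p', toks', h, _⟩ := parse_terminates_keeps_inv cfg js Parser.init toks n hlen ((safeFacts cfg).init toks n hinit)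
  exact ⟨r, toks', by simp [run, h]⟩

end Jsmn
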